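-- pv_equiv track=rewrite | github.com/andrewgordstewart/Rosalind | Rosalind/suffixarray.py | to_int_keys
-- ===== SOURCE A (Python) =====
-- def to_int_keys(l):
--     """
--     l: iterable of keys
--     returns: a list with integer keys
--     """
--     seen = set()
--     ls = []
--     for e in l:
--         if e not in seen:
--             ls.append(e)
--             seen.add(e)
--     ls.sort()
--     index = {v: i for i, v in enumerate(ls)}
--     return [index[v] for v in l]
-- ===== SOURCE B (Python) =====
-- def to_int_keys(l):
--     """
--     l: iterable of keys
--     returns: a list with integer keys
--     """
--     distinct = set(l)
--     return [sum(1 for u in distinct if u < v) for v in l]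
-- ===== Notes on version B (the rewrite author's own statement) =====
-- stated objective: simpler
-- what changed: Replaces A's dedup-set + sort + enumerate-dict + lookup pipeline by directly computing each element's rank as the number of distinct values strictly below it, with no sort and no index dictionary.
import Mathlib
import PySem

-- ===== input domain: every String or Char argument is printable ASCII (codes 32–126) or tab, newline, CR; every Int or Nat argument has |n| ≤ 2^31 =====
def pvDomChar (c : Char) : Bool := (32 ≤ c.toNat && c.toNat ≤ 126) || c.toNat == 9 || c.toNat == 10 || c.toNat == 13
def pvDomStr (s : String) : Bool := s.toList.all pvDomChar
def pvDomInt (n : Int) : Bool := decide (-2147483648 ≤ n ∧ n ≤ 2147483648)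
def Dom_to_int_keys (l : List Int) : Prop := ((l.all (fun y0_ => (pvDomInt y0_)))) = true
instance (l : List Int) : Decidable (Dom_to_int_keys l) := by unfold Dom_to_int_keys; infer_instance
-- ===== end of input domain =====

-- B replaces A's dedup + sort + index-dict + lookup pipeline by counting, for each element,
-- the distinct values strictly below it (objective: simpler; not claimed faster).

-- ===== PORT A =====
-- the 'for e in l' dedup loop carries the pair state (seen, ls)
def to_int_keys (l : List Int) : List Int :=
  let st := l.foldl
    (fun (p : PySem.Set Int × List Int) e =>
      if PySem.Set.contains p.1 e then p else (PySem.Set.add p.1 e, p.2 ++ [e]))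
    (PySem.Set.empty, [])
  let ls := PySem.List.sorted st.2 (fun x => x) false       -- ls.sort()
  let index := (PySem.List.enumerate ls 0).foldl
    (fun d p => d.insert p.2 p.1) PySem.Dict.empty          -- {v: i for i, v in enumerate(ls)}
  l.map (fun v => index.getD v 0)   -- index[v]; KeyError impossible: every v ∈ l occurs in ls

-- ===== PORT B =====
def to_int_keys_alt (l : List Int) : List Int :=
  let distinct := PySem.Set.ofList l
  l.map (fun v => ((distinct.countP (fun u => decide (u < v)) : Nat) : Int))

-- ===== PRECONDITION & SPEC =====
def Spec_to_int_keys (l : List Int) (out : List Int) : Prop := out = to_int_keys_alt l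
instance (l : List Int) (out : List Int) : Decidable (Spec_to_int_keys l out) := by unfold Spec_to_int_keys; infer_instance

-- ===== CLAIM (what is proved, stated in full; the proofs are below) =====
def Claim_equal_to_int_keys : Prop := ∀ (l : List Int), Dom_to_int_keys l → Spec_to_int_keys l (to_int_keys l)

-- ===== LEMMAS AND PROOFS =====

-- A's dedup loop keeps seen = ls; both components are the running Set.add fold
theorem pv_dedup_loop (l : List Int) (s : PySem.Set Int) :
    l.foldl (fun (p : PySem.Set Int × List Int) e =>
        if PySem.Set.contains p.1 e then p else (PySem.Set.add p.1 e, p.2 ++ [e])) (s, s)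
    = (l.foldl PySem.Set.add s, l.foldl PySem.Set.add s) := by
  induction l generalizing s with
  | nil => rfl
  | cons a t ih =>
    simp only [List.foldl_cons]
    by_cases h : a ∈ s
    · rw [PySem.Set.add_of_mem h]
      have hc : PySem.Set.contains s a = true := by
        rw [PySem.Set.contains_iff]; exact h
      simp only [hc, if_true, ih]
    · rw [PySem.Set.add_of_not_mem h]
      have hc : PySem.Set.contains s a = false := by
        rw [← Bool.not_eq_true, PySem.Set.contains_iff]; exact h
      simp only [hc, Bool.false_eq_true, if_false]
      exact ih (s ++ [a])

-- in a strictly increasing list, the element with k smaller values sits at position k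
theorem pv_rank_get (s : List Int) (hs : s.Pairwise (· < ·)) (v : Int) (hv : v ∈ s) :
    ∃ h : s.countP (fun u => decide (u < v)) < s.length,
      s[s.countP (fun u => decide (u < v))] = v := by
  induction s with
  | nil => cases hv
  | cons a t ih =>
    rw [List.pairwise_cons] at hs
    obtain ⟨ha, ht⟩ := hs
    rcases List.mem_cons.mp hv with rfl | hv'
    · have h0 : (v :: t).countP (fun u => decide (u < v)) = 0 := by
        rw [List.countP_eq_zero]
        intro u hu
        rcases List.mem_cons.mp hu with rfl | hu'
        · simp
        · simp [not_lt.mpr (le_of_lt (ha u hu'))]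
      exact ⟨by simp [h0], by simp [h0]⟩
    · obtain ⟨h, hg⟩ := ih ht hv'
      have hc : (a :: t).countP (fun u => decide (u < v))
          = t.countP (fun u => decide (u < v)) + 1 := by
        simp [ha v hv']
      have hlt : (a :: t).countP (fun u => decide (u < v)) < (a :: t).length := by
        rw [hc]; simp only [List.length_cons]; omega
      refine ⟨hlt, ?_⟩
      simp only [hc, List.getElem_cons_succ]
      exact hg

-- ===== VERDICT (by name: the statement is the Claim_ definition above) =====
theorem to_int_keys_spec : Claim_equal_to_int_keys := by
  intro l _
  show to_int_keys l = to_int_keys_alt l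
  unfold to_int_keys to_int_keys_alt
  -- name the pieces
  have hst : l.foldl
      (fun (p : PySem.Set Int × List Int) e =>
        if PySem.Set.contains p.1 e then p else (PySem.Set.add p.1 e, p.2 ++ [e]))
      (PySem.Set.empty, []) = (PySem.Set.ofList l, PySem.Set.ofList l) := by
    rw [PySem.Set.ofList_eq_foldl]
    exact pv_dedup_loop l PySem.Set.empty
  rw [hst]
  set S := PySem.Set.ofList l with hS
  set s := PySem.List.sorted S (fun x => x) false with hs_def
  have hperm : s.Perm S := PySem.List.sorted_perm S (fun x => x) false
  have hpair : s.Pairwise (· < ·) := PySem.List.sorted_ofList_pairwise_lt l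
  have hnodup : s.Nodup := hperm.nodup_iff.mpr (PySem.Set.nodup_ofList l)
  -- the index dict's items
  have hitems : ((PySem.List.enumerate s 0).foldl
      (fun d p => d.insert p.2 p.1) PySem.Dict.empty).items
      = (PySem.List.enumerate s 0).map (fun p => (p.2, p.1)) := by
    have := PySem.Dict.items_foldl_insert_fresh (l := PySem.List.enumerate s 0)
      (k := fun p => p.2) (v := fun p => p.1) (d := PySem.Dict.empty)
      (by intro a _; simp [PySem.Dict.contains_empty])
      (by rw [PySem.List.map_snd_enumerate]; exact hnodup)
    simpa using this
  have hkeys : ((PySem.List.enumerate s 0).foldl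
      (fun d p => d.insert p.2 p.1) PySem.Dict.empty).keys.Nodup := by
    show (((PySem.List.enumerate s 0).foldl
      (fun d p => d.insert p.2 p.1) PySem.Dict.empty).items.map (·.1)).Nodup
    rw [hitems, List.map_map]
    have : ((fun (p : Int × Int) => p.1) ∘ fun p => (p.2, p.1))
        = (fun (p : Int × Int) => p.2) := rfl
    rw [this, PySem.List.map_snd_enumerate]
    exact hnodup
  apply List.map_congr_left
  intro v hv
  have hvS : v ∈ S := ((PySem.Set.mem_ofList l) v).mpr hv
  have hvs : v ∈ s := hperm.mem_iff.mpr hvS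
  obtain ⟨hk, hgk⟩ := pv_rank_get s hpair v hvs
  set k := s.countP (fun u => decide (u < v)) with hk_def
  have hmem : ((v, (k : Int)) : Int × Int) ∈ (PySem.List.enumerate s 0).map (fun p => (p.2, p.1)) := by
    refine List.mem_map.mpr ⟨((k : Int), v), ?_, rfl⟩
    rw [PySem.List.mem_enumerate_iff]
    refine ⟨k, hk, ?_⟩
    simp only [Prod.mk.injEq]
    exact ⟨by omega, hgk.symm⟩
  have hget : ((PySem.List.enumerate s 0).foldl
      (fun d p => d.insert p.2 p.1) PySem.Dict.empty).getD v 0 = (k : Int) := by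
    apply PySem.Dict.getD_of_mem_items
    · rw [hitems]; exact hmem
    · exact hkeys
  rw [hget]
  have : k = S.countP (fun u => decide (u < v)) := hperm.countP_eq _
  rw [this]
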